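-- pv_equiv track=rewrite | github.com/ameetmund/python | dev_20210829.py | kevin_score
-- ===== SOURCE A (Python) =====
-- word = 'BANANA'
--
-- def kevin_score(vowel_set):
--     for i, item in enumerate(vowel_set):
--         vowel_index = word.index(item)
--         kevin_points = []
--         for j, letter in enumerate(word[vowel_index:]):
--             if j == 0:
--                 kevin_points.append(letter)
--             else:
--                 new_word = kevin_points[j-1] + letter
--                 kevin_points.append(new_word)
--         return kevin_points
-- ===== SOURCE B (Python) =====
-- word = 'BANANA'
--
-- def kevin_score(vowel_set):
--     for item in vowel_set:
--         suffix = word[word.index(item):]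
--         return [suffix[:k] for k in range(1, len(suffix) + 1)]
-- ===== Notes on version B (the rewrite author's own statement) =====
-- stated objective: simpler
-- what changed: B drops the running accumulator and the indexed append loop: it slices the suffix once and produces each cumulative prefix as an independent slice suffix[:k].
-- outside the precondition, e.g. on kevin_score([]): A returns None, B returns None; on kevin_score(['X']): A raises ValueError, B raises ValueError
import Mathlib
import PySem

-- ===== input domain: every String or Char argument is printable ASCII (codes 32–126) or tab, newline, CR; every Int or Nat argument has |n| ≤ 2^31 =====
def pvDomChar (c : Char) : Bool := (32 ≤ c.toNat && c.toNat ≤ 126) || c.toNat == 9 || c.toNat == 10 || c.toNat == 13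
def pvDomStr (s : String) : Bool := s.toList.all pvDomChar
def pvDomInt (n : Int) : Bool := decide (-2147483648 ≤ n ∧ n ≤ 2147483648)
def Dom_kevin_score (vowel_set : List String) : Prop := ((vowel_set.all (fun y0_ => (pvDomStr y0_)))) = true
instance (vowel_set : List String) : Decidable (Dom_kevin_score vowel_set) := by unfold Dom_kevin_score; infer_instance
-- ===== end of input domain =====

-- B replaces A's running accumulator and indexed inner loop by independent slices suffix[:k] (objective: simpler).
-- A returns None on [] and raises ValueError when the first element is not a substring of 'BANANA'; both are outside Pre_.

-- ===== PORT A =====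
def kevin_score (vowel_set : List String) : List String :=
  match vowel_set with
  | [] => []            -- Python returns None here (no value of the type); excluded by Pre_
  | item :: _ =>
    -- word.index(item): Python raises ValueError when find = -1; excluded by Pre_
    let vowel_index : Int := PySem.Str.find "BANANA" item
    (PySem.List.enumerate (PySem.Str.slice "BANANA" (some vowel_index) none).toList).foldl
      (fun kevin_points jl =>
        if jl.1 == 0 then
          kevin_points ++ [String.ofList [jl.2]]
        else
          -- kevin_points[j-1] + letter; the index is always in range here
          kevin_points ++ [((PySem.List.pyGet? kevin_points (jl.1 - 1)).getD "") ++ String.ofList [jl.2]])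
      []

-- ===== PORT B =====
def kevin_score_alt (vowel_set : List String) : List String :=
  match vowel_set with
  | [] => []            -- Python returns None here; excluded by Pre_
  | item :: _ =>
    let suffix := PySem.Str.slice "BANANA" (some (PySem.Str.find "BANANA" item)) none
    (PySem.List.pyRange 1 ((PySem.Str.len suffix : Int) + 1) 1).map
      (fun k => PySem.Str.slice suffix none (some k))

-- ===== PRECONDITION & SPEC =====
-- Pre_ excludes the empty list (A returns None, not a list) and lists whose first element is
-- not a substring of 'BANANA' (A raises ValueError).
def Pre_kevin_score (vowel_set : List String) : Prop :=
  vowel_set ≠ [] ∧ PySem.Str.isIn (vowel_set.headD "") "BANANA" = true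
instance (vowel_set : List String) : Decidable (Pre_kevin_score vowel_set) := by
  unfold Pre_kevin_score; infer_instance
def pvWitness_kevin_score : List String := (["AN"])

def Spec_kevin_score (vowel_set : List String) (out : List String) : Prop := out = kevin_score_alt vowel_set
instance (vowel_set : List String) (out : List String) : Decidable (Spec_kevin_score vowel_set out) := by unfold Spec_kevin_score; infer_instance

-- ===== CLAIM (what is proved, stated in full; the proofs are below) =====
def Claim_equal_kevin_score : Prop := ∀ (vowel_set : List String), Dom_kevin_score vowel_set → Pre_kevin_score vowel_set → Spec_kevin_score vowel_set (kevin_score vowel_set)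

-- ===== LEMMAS AND PROOFS =====

-- ===== VERDICT (by name: the statement is the Claim_ definition above) =====
theorem kevin_score_spec : Claim_equal_kevin_score := by
  intro vs _dom pre
  obtain ⟨hne, hin⟩ := pre
  unfold Spec_kevin_score
  match vs, hne with
  | item :: rest, _ =>
    simp only [List.headD] at hin
    have hinf : item.toList <:+: "BANANA".toList := (PySem.Str.isIn_iff_infix _ _).mp hin
    have h0 : (0:Int) ≤ PySem.Str.find "BANANA" item :=
      (PySem.Str.find_nonneg_iff _ _).mpr hinf
    have h6 : PySem.Str.find "BANANA" item ≤ 6 := by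
      have h := PySem.Chars.find_le_length "BANANA".toList item.toList
      simpa using h
    simp only [kevin_score, kevin_score_alt]
    set n : Int := PySem.Str.find "BANANA" item with hn
    interval_cases n <;> decide
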